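-- pv_equiv track=rewrite | github.com/amylingchen/Dagtest | dagcase/utils.py | remove_included_dicts
-- ===== SOURCE A (Python) =====
-- def remove_included_dicts(dict_list):
--     dict_list.sort(key=len)
--
--     to_remove = set()
--     for i, dict1 in enumerate(dict_list):
--         for j in range(i + 1, len(dict_list)):
--             dict2 = dict_list[j]
--             if dict1.items() <= dict2.items():  # dict1 被 dict2 包含
--                 to_remove.add(i)
--                 break
--
--
--     return [d for i, d in enumerate(dict_list) if i not in to_remove]
-- ===== SOURCE B (Python) =====
-- def remove_included_dicts(dict_list):
--     dict_list.sort(key=len)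
--     kept = []  # current maximal dicts among the suffix processed so far
--     keep = [False] * len(dict_list)
--     for i in range(len(dict_list) - 1, -1, -1):
--         d = dict_list[i]
--         if not any(d.items() <= k.items() for k in kept):
--             keep[i] = True
--             kept.append(d)
--     return [d for i, d in enumerate(dict_list) if keep[i]]
-- ===== Notes on version B (the rewrite author's own statement) =====
-- stated objective: alternative
-- what changed: Instead of scanning, for each dict, all later dicts in the sorted list, B walks the sorted list backwards maintaining an accumulator 'kept' of the maximal dicts accepted so far and tests each dict only against that set (correct by transitivity of item-subset), then filters by the recorded keep flags.
import Mathlib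
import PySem

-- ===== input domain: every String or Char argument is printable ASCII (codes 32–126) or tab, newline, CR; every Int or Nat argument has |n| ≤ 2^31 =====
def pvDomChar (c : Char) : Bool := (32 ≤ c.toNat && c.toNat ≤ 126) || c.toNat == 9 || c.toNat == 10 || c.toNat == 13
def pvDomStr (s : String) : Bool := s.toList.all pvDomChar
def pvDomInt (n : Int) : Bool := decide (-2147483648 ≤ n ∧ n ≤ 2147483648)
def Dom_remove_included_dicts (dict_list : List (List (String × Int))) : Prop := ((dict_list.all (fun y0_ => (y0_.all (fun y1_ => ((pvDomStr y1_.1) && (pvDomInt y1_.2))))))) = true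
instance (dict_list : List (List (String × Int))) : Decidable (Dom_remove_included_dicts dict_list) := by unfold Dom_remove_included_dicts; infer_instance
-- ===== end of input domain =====

-- B removes dominated dicts by a backward sweep keeping only the current maximal set, instead of A's
-- full scan over all later dicts (objective: alternative decomposition). Both Pythons sort dict_list
-- in place (the equivalence proved here is about the return value; B performs the same mutation).

-- ===== PORT A =====
-- shared rendering of Python's `dict1.items() <= dict2.items()` (both sources contain this exact test)
def pvSubset (d1 d2 : List (String × Int)) : Bool := d1.all (fun p => d2.contains p)

-- inner `for j in range(i+1, len(...))` with break; indices from the range are always in bounds,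
-- so the pyGetD default [] is never used
def pvInnerA (s : List (List (String × Int))) (d1 : List (String × Int)) (js : List Int)
    (tr : PySem.Set Int) (i : Int) : PySem.Set Int :=
  match js with
  | [] => tr
  | j :: rest =>
      let d2 := PySem.List.pyGetD s j []
      if pvSubset d1 d2 then PySem.Set.add tr i else pvInnerA s d1 rest tr i

-- outer `for i, dict1 in enumerate(dict_list)`
def pvOuterA (s : List (List (String × Int))) (pairs : List (Int × List (String × Int)))
    (tr : PySem.Set Int) : PySem.Set Int :=
  match pairs with
  | [] => tr
  | (i, d1) :: rest =>
      pvOuterA s rest (pvInnerA s d1 (PySem.List.pyRange (i + 1) (PySem.List.len s) 1) tr i)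

def remove_included_dicts (dict_list : List (List (String × Int))) : List (List (String × Int)) :=
  let s := PySem.List.sorted dict_list (fun d => d.length) false
  let tr := pvOuterA s (PySem.List.enumerate s 0) PySem.Set.empty
  (PySem.List.enumerate s 0).filterMap (fun p => if PySem.Set.contains tr p.1 then none else some p.2)

-- ===== PORT B =====
-- the backward loop `for i in range(len(...)-1, -1, -1)`: the suffix is processed first;
-- returns (keep flags for this suffix, kept)
def pvLoopB (l : List (List (String × Int))) : List Bool × List (List (String × Int)) :=
  match l with
  | [] => ([], [])
  | d :: rest =>
      let (flags, kept) := pvLoopB rest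
      if kept.any (fun k => pvSubset d k) then (false :: flags, kept)
      else (true :: flags, kept ++ [d])

def remove_included_dicts_alt (dict_list : List (List (String × Int))) : List (List (String × Int)) :=
  let s := PySem.List.sorted dict_list (fun d => d.length) false
  let flags := (pvLoopB s).1
  (s.zip flags).filterMap (fun p => if p.2 then some p.1 else none)

-- ===== PRECONDITION & SPEC =====
def Spec_remove_included_dicts (dict_list : List (List (String × Int))) (out : List (List (String × Int))) : Prop := out = remove_included_dicts_alt dict_list
instance (dict_list : List (List (String × Int))) (out : List (List (String × Int))) : Decidable (Spec_remove_included_dicts dict_list out) := by unfold Spec_remove_included_dicts; infer_instance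

-- ===== CLAIM (what is proved, stated in full; the proofs are below) =====
def Claim_equal_remove_included_dicts : Prop := ∀ (dict_list : List (List (String × Int))), Dom_remove_included_dicts dict_list → Spec_remove_included_dicts dict_list (remove_included_dicts dict_list)

-- ===== LEMMAS AND PROOFS =====

-- reference output on the sorted list: keep a dict iff no later dict contains it
def pvSpecOut : List (List (String × Int)) → List (List (String × Int))
  | [] => []
  | d :: rest => if rest.any (fun k => pvSubset d k) then pvSpecOut rest else d :: pvSpecOut rest

-- the keep flags B's loop computes, stated directly against the suffix of the list
def pvFlags : List (List (String × Int)) → List Bool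
  | [] => []
  | d :: rest => (!(rest.any (fun k => pvSubset d k))) :: pvFlags rest

theorem pvSubset_trans {a b c : List (String × Int)} (h1 : pvSubset a b = true)
    (h2 : pvSubset b c = true) : pvSubset a c = true := by
  simp only [pvSubset, List.all_eq_true] at *
  intro p hp
  exact h2 _ (by simpa using h1 p hp)

-- B's accumulator is subset-equivalent to the whole suffix it came from
theorem pvLoopB_kept (l : List (List (String × Int))) (x : List (String × Int)) :
    ((pvLoopB l).2).any (fun k => pvSubset x k) = l.any (fun k => pvSubset x k) := by
  induction l generalizing x with
  | nil => rfl
  | cons d rest ih =>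
    simp only [pvLoopB, List.any_cons]
    by_cases h : ((pvLoopB rest).2).any (fun k => pvSubset d k) = true
    · rw [if_pos h]
      dsimp only
      rw [ih]
      by_cases hxd : pvSubset x d = true
      · obtain ⟨k0, hk0, hdk0⟩ := List.any_eq_true.mp h
        have hxk0 : pvSubset x k0 = true := pvSubset_trans hxd hdk0
        have hx : ((pvLoopB rest).2).any (fun k => pvSubset x k) = true :=
          List.any_eq_true.mpr ⟨k0, hk0, hxk0⟩
        rw [ih] at hx
        simp [hxd, hx]
      · have : pvSubset x d = false := Bool.eq_false_iff.mpr hxd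
        rw [this, Bool.false_or]
    · rw [if_neg h]
      dsimp only
      simp only [List.any_append, List.any_cons, List.any_nil, Bool.or_false, ih]
      rw [Bool.or_comm]

theorem pvLoopB_flags (l : List (List (String × Int))) : (pvLoopB l).1 = pvFlags l := by
  induction l with
  | nil => rfl
  | cons d rest ih =>
    simp only [pvLoopB, pvFlags, pvLoopB_kept rest d]
    by_cases h : rest.any (fun k => pvSubset d k) = true
    · rw [if_pos h]; simp [h, ih]
    · rw [if_neg h]
      have : rest.any (fun k => pvSubset d k) = false := Bool.eq_false_iff.mpr h
      simp [this, ih]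

theorem pvZipFlags (l : List (List (String × Int))) :
    (l.zip (pvFlags l)).filterMap (fun p => if p.2 then some p.1 else none) = pvSpecOut l := by
  induction l with
  | nil => rfl
  | cons d rest ih =>
    simp only [pvFlags, List.zip_cons_cons, List.filterMap_cons, pvSpecOut]
    by_cases h : rest.any (fun k => pvSubset d k) = true
    · simp [h, ih]
    · simp [h, ih]

theorem pvAltOut (dl : List (List (String × Int))) :
    remove_included_dicts_alt dl = pvSpecOut (PySem.List.sorted dl (fun d => d.length) false) := by
  simp only [remove_included_dicts_alt]
  rw [pvLoopB_flags, pvZipFlags]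

-- A's inner loop: it adds i exactly when some index in js hits a superset (the break only stops early)
theorem pvInnerA_eq (s : List (List (String × Int))) (d1 : List (String × Int))
    (js : List Int) (tr : PySem.Set Int) (i : Int) :
    pvInnerA s d1 js tr i =
      if js.any (fun j => pvSubset d1 (PySem.List.pyGetD s j [])) then PySem.Set.add tr i else tr := by
  induction js with
  | nil => rfl
  | cons j rest ih =>
    simp only [pvInnerA, List.any_cons]
    by_cases h : pvSubset d1 (PySem.List.pyGetD s j []) = true
    · simp [h]
    · simp [Bool.eq_false_iff.mpr h, ih]

-- the inner range test is an `any` over the suffix of s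
theorem pvRangeAny (s : List (List (String × Int))) (d1 : List (String × Int)) (m : Nat) :
    (PySem.List.pyRange ((m : Int)) (PySem.List.len s) 1).any
        (fun j => pvSubset d1 (PySem.List.pyGetD s j [])) = (s.drop m).any (fun k => pvSubset d1 k) := by
  have h := PySem.List.map_pyGetD_pyRange (xs := s) (d := []) (a := (m : Int)) (by positivity)
  calc (PySem.List.pyRange ((m : Int)) (PySem.List.len s) 1).any
        (fun j => pvSubset d1 (PySem.List.pyGetD s j []))
      = ((PySem.List.pyRange ((m : Int)) (PySem.List.len s) 1).map
          (fun j => PySem.List.pyGetD s j [])).any (fun k => pvSubset d1 k) := by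
        rw [List.any_map]; rfl
    _ = (s.drop m).any (fun k => pvSubset d1 k) := by rw [h, Int.toNat_natCast]

-- membership in the set A's double loop builds
theorem pvOuterA_mem (s : List (List (String × Int))) (pairs : List (Int × List (String × Int)))
    (tr : PySem.Set Int) (x : Int) :
    x ∈ pvOuterA s pairs tr ↔ x ∈ tr ∨ ∃ p ∈ pairs, p.1 = x ∧
      (PySem.List.pyRange (p.1 + 1) (PySem.List.len s) 1).any
        (fun j => pvSubset p.2 (PySem.List.pyGetD s j [])) = true := by
  induction pairs generalizing tr with
  | nil => simp [pvOuterA]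
  | cons p rest ih =>
    obtain ⟨i, d1⟩ := p
    simp only [pvOuterA, ih, pvInnerA_eq]
    by_cases h : (PySem.List.pyRange (i + 1) (PySem.List.len s) 1).any
        (fun j => pvSubset d1 (PySem.List.pyGetD s j [])) = true
    · rw [if_pos h, PySem.Set.mem_add]
      constructor
      · rintro (⟨htr | hxi⟩ | hrest)
        · exact Or.inl htr
        · exact Or.inr ⟨(i, d1), List.mem_cons_self .., hxi.symm, h⟩
        · obtain ⟨q, hq, hqx, hqa⟩ := hrest
          exact Or.inr ⟨q, List.mem_cons_of_mem _ hq, hqx, hqa⟩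
      · rintro (htr | ⟨q, hq, hqx, hqa⟩)
        · exact Or.inl (Or.inl htr)
        · rcases List.mem_cons.mp hq with rfl | hq'
          · exact Or.inl (Or.inr hqx.symm)
          · exact Or.inr ⟨q, hq', hqx, hqa⟩
    · rw [if_neg h]
      constructor
      · rintro (htr | ⟨q, hq, hqx, hqa⟩)
        · exact Or.inl htr
        · exact Or.inr ⟨q, List.mem_cons_of_mem _ hq, hqx, hqa⟩
      · rintro (htr | ⟨q, hq, hqx, hqa⟩)
        · exact Or.inl htr
        · rcases List.mem_cons.mp hq with rfl | hq'
          · exact absurd hqa h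
          · exact Or.inr ⟨q, hq', hqx, hqa⟩

-- the removal set, characterised index-wise on the sorted list
theorem pvTr_contains (s : List (List (String × Int))) (k : Nat) (hk : k < s.length) :
    PySem.Set.contains (pvOuterA s (PySem.List.enumerate s 0) PySem.Set.empty) ((k : Int))
      = (s.drop (k + 1)).any (fun x => pvSubset s[k] x) := by
  have hmem : ((k : Int)) ∈ pvOuterA s (PySem.List.enumerate s 0) PySem.Set.empty
      ↔ (s.drop (k + 1)).any (fun x => pvSubset s[k] x) = true := by
    rw [pvOuterA_mem]
    constructor
    · rintro (h0 | ⟨p, hp, hpx, hpa⟩)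
      · simp [PySem.Set.empty] at h0
      · obtain ⟨j, hj, rfl⟩ := (PySem.List.mem_enumerate_iff s 0 p).mp hp
        simp only [zero_add] at hpx hpa
        have hjk : j = k := by exact_mod_cast hpx
        subst hjk
        have : ((j : Int) + 1) = (((j + 1 : Nat)) : Int) := by push_cast; ring
        rw [this, pvRangeAny] at hpa
        exact hpa
    · intro h
      refine Or.inr ⟨((k : Int), s[k]), ?_, rfl, ?_⟩
      · exact (PySem.List.mem_enumerate_iff s 0 _).mpr ⟨k, hk, by simp⟩
      · have : ((k : Int) + 1) = (((k + 1 : Nat)) : Int) := by push_cast; ring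
        rw [this, pvRangeAny]
        exact h
  have hc : PySem.Set.contains (pvOuterA s (PySem.List.enumerate s 0) PySem.Set.empty) ((k : Int)) = true
      ↔ ((k : Int)) ∈ pvOuterA s (PySem.List.enumerate s 0) PySem.Set.empty := by
    exact List.contains_iff_mem
  rcases hb : (s.drop (k + 1)).any (fun x => pvSubset s[k] x) with _ | _
  · rw [Bool.eq_false_iff]
    intro hcon
    have := hmem.mp (hc.mp hcon)
    rw [hb] at this; exact Bool.false_ne_true this
  · exact hc.mpr (hmem.mpr hb)

-- the final comprehension, generalised over the suffix being enumerated
theorem pvAfilt (s : List (List (String × Int))) (Q : Int → Bool)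
    (hQ : ∀ (k : Nat) (h : k < s.length), Q ((k : Int)) = (s.drop (k + 1)).any (fun x => pvSubset s[k] x)) :
    ∀ (fuel m : Nat), s.length - m ≤ fuel →
      (PySem.List.enumerate (s.drop m) ((m : Int))).filterMap
        (fun p => if Q p.1 then none else some p.2) = pvSpecOut (s.drop m) := by
  intro fuel
  induction fuel with
  | zero =>
    intro m hm
    have : s.drop m = [] := List.drop_eq_nil_of_le (by omega)
    simp [this, pvSpecOut]
  | succ n ih =>
    intro m hm
    by_cases hlt : m < s.length
    · rw [List.drop_eq_getElem_cons hlt]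
      rw [PySem.List.enumerate_cons, List.filterMap_cons]
      have hcast : ((m : Int) + 1) = (((m + 1 : Nat)) : Int) := by push_cast; ring
      have hrec : (PySem.List.enumerate (s.drop (m + 1)) (((m + 1 : Nat)) : Int)).filterMap
          (fun p => if Q p.1 then none else some p.2) = pvSpecOut (s.drop (m + 1)) :=
        ih (m + 1) (by omega)
      rw [hcast, hrec, hQ m hlt, pvSpecOut]
      by_cases h : (s.drop (m + 1)).any (fun x => pvSubset s[m] x) = true
      · simp [h]
      · simp [Bool.eq_false_iff.mpr h]
    · have : s.drop m = [] := List.drop_eq_nil_of_le (by omega)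
      simp [this, pvSpecOut]

theorem pvAOut (dl : List (List (String × Int))) :
    remove_included_dicts dl = pvSpecOut (PySem.List.sorted dl (fun d => d.length) false) := by
  simp only [remove_included_dicts]
  set s := PySem.List.sorted dl (fun d => d.length) false with hs
  have := pvAfilt s
    (fun x => PySem.Set.contains (pvOuterA s (PySem.List.enumerate s 0) PySem.Set.empty) x)
    (fun k hk => pvTr_contains s k hk) (s.length) 0 (by omega)
  simpa using this

-- ===== VERDICT (by name: the statement is the Claim_ definition above) =====
theorem remove_included_dicts_spec : Claim_equal_remove_included_dicts := by
  intro dl _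
  unfold Spec_remove_included_dicts
  rw [pvAOut, pvAltOut]
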